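-- pv_equiv track=rewrite | github.com/CoLAB-ATLANTIC/ObsSea4Clim | src/detection_utils.py | unique_codes_to_dict
-- ===== SOURCE A (Python) =====
-- def unique_codes_to_dict(unique_codes):
--     unique_codes_dict=dict(); visited_lbls=list()
--     for lbl_tuple, code in unique_codes.items():
--
--         if lbl_tuple[1] in visited_lbls:
--             unique_codes_dict[lbl_tuple[1]][lbl_tuple]=code
--         else:
--             unique_codes_dict[lbl_tuple[1]] = {lbl_tuple: code}
--             visited_lbls.append(lbl_tuple[1])
--     return unique_codes_dict
-- ===== SOURCE B (Python) =====
-- def unique_codes_to_dict(unique_codes):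
--     labels = dict.fromkeys(k[1] for k in unique_codes)
--     return {lbl: {k: v for k, v in unique_codes.items() if k[1] == lbl}
--             for lbl in labels}
-- ===== Notes on version B (the rewrite author's own statement) =====
-- stated objective: alternative
-- what changed: Replaces A's single streaming pass (visited-list membership check plus in-place nested dict updates) by a two-phase map/filter: first collect the distinct second labels in first-occurrence order via dict.fromkeys, then build each inner group with one filtering comprehension over the items.
import Mathlib
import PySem

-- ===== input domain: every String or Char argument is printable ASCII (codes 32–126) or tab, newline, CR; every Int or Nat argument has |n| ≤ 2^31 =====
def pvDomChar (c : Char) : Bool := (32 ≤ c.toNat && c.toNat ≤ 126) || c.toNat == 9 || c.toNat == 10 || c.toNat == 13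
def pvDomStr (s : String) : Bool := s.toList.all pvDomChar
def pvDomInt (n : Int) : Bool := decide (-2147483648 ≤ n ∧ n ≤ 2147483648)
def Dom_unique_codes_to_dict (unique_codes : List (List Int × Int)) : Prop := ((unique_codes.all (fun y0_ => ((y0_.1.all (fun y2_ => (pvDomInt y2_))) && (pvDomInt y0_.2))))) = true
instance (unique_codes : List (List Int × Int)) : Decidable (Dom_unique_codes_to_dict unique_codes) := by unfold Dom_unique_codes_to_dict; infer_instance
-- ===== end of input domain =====

-- B replaces A's streaming pass (visited-list membership + in-place nested dict updates) by a
-- two-phase map/filter: the distinct second labels first, then one filtering pass per label.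
-- Alternative decomposition, same asymptotic cost.

-- ===== PORT A =====
def unique_codes_to_dict (unique_codes : List (List Int × Int)) : List (Int × List (List Int × Int)) :=
  let st := (PySem.Dict.ofList unique_codes).items.foldl
    (fun (st : PySem.Dict Int (PySem.Dict (List Int) Int) × List Int) kv =>
      let lbl := (PySem.List.pyGet? kv.1 1).getD 0
      if st.2.contains lbl then
        (st.1.modify lbl PySem.Dict.empty (fun inner => inner.insert kv.1 kv.2), st.2)
      else
        (st.1.insert lbl (PySem.Dict.ofList [(kv.1, kv.2)]), st.2 ++ [lbl]))
    (PySem.Dict.empty, [])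
  st.1.items.map (fun p => (p.1, p.2.items))

-- ===== PORT B =====
def unique_codes_to_dict_alt (unique_codes : List (List Int × Int)) : List (Int × List (List Int × Int)) :=
  let items := (PySem.Dict.ofList unique_codes).items
  let labels := PySem.List.dedup (items.map (fun kv => (PySem.List.pyGet? kv.1 1).getD 0))
  labels.map (fun lbl =>
    (lbl, (PySem.Dict.ofList (items.filter
      (fun kv => (PySem.List.pyGet? kv.1 1).getD 0 == lbl))).items))

-- ===== PRECONDITION & SPEC =====
-- Pre_ admits exactly the inputs where Python A returns: a key tuple of length < 2 makes
-- lbl_tuple[1] raise IndexError.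
def Pre_unique_codes_to_dict (unique_codes : List (List Int × Int)) : Prop :=
  ∀ p ∈ unique_codes, 2 ≤ p.1.length
instance (unique_codes : List (List Int × Int)) : Decidable (Pre_unique_codes_to_dict unique_codes) := by unfold Pre_unique_codes_to_dict; infer_instance
def pvWitness_unique_codes_to_dict : (List (List Int × Int)) := [([1, 2], 5), ([3, 2], 6), ([0, 1], 7)]
def Spec_unique_codes_to_dict (unique_codes : List (List Int × Int)) (out : List (Int × List (List Int × Int))) : Prop := out = unique_codes_to_dict_alt unique_codes
instance (unique_codes : List (List Int × Int)) (out : List (Int × List (List Int × Int))) : Decidable (Spec_unique_codes_to_dict unique_codes out) := by unfold Spec_unique_codes_to_dict; infer_instance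

-- ===== CLAIM (what is proved, stated in full; the proofs are below) =====
def Claim_equal_unique_codes_to_dict : Prop := ∀ (unique_codes : List (List Int × Int)), Dom_unique_codes_to_dict unique_codes → Pre_unique_codes_to_dict unique_codes → Spec_unique_codes_to_dict unique_codes (unique_codes_to_dict unique_codes)

-- ===== LEMMAS AND PROOFS =====

lemma pv_ofList_items (l : List ((List Int) × Int))
    (h : (l.map (fun p => p.1)).Nodup) : (PySem.Dict.ofList l).items = l := by
  have := PySem.Dict.items_foldl_insert_fresh l (fun p => p.1) (fun p => p.2)
      PySem.Dict.empty (by intro a _; rfl) h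
  simpa [PySem.Dict.ofList, PySem.Dict.update, PySem.Dict.empty] using this

lemma pv_set_add_of_contains (s : PySem.Set Int) (a : Int) (h : List.contains s a = true) :
    PySem.Set.add s a = s := by
  unfold PySem.Set.add PySem.Set.contains
  rw [h]
  simp

lemma pv_set_add_of_not_contains (s : PySem.Set Int) (a : Int) (h : List.contains s a = false) :
    PySem.Set.add s a = s ++ [a] := by
  unfold PySem.Set.add PySem.Set.contains
  rw [h]
  simp

-- loop invariant: after the fold, the visited list holds the distinct labels in
-- first-occurrence order and the dict maps each such label to the sub-dict of the
-- items carrying it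
lemma pv_core (L : List (List Int × Int)) (h : (L.map (fun p => p.1)).Nodup) :
    L.foldl
      (fun (st : PySem.Dict Int (PySem.Dict (List Int) Int) × List Int) kv =>
        let lbl := (PySem.List.pyGet? kv.1 1).getD 0
        if st.2.contains lbl then
          (st.1.modify lbl PySem.Dict.empty (fun inner => inner.insert kv.1 kv.2), st.2)
        else
          (st.1.insert lbl (PySem.Dict.ofList [(kv.1, kv.2)]), st.2 ++ [lbl]))
      (PySem.Dict.empty, [])
    = (PySem.Dict.mk ((PySem.Set.ofList (L.map (fun kv => (PySem.List.pyGet? kv.1 1).getD 0))).map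
         (fun lbl => (lbl, PySem.Dict.mk (L.filter (fun kv => (PySem.List.pyGet? kv.1 1).getD 0 == lbl))))),
       PySem.Set.ofList (L.map (fun kv => (PySem.List.pyGet? kv.1 1).getD 0))) := by
  induction L using List.reverseRecOn with
  | nil => rfl
  | append_singleton L x ih =>
    simp only [List.map_append, List.map_cons, List.map_nil, List.nodup_append] at h
    obtain ⟨hL, -, hdisj⟩ := h
    have hx1 : x.1 ∉ L.map (fun p => p.1) :=
      fun hm => hdisj _ hm _ (List.mem_singleton_self _) rfl
    have hset : ∀ (ys : List Int) (a : Int),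
        PySem.Set.ofList (ys ++ [a]) = PySem.Set.add (PySem.Set.ofList ys) a := by
      intro ys a
      unfold PySem.Set.ofList
      rw [List.foldl_append]
      rfl
    rw [List.foldl_append, ih hL, List.foldl_cons, List.foldl_nil]
    simp only [List.map_append, List.map_cons, List.map_nil, List.filter_append, hset]
    by_cases hc : List.contains (PySem.Set.ofList (L.map (fun kv => (PySem.List.pyGet? kv.1 1).getD 0))) ((PySem.List.pyGet? x.1 1).getD 0) = true
    · -- the label of x was already visited
      have hmem : ((PySem.List.pyGet? x.1 1).getD 0) ∈ PySem.Set.ofList (L.map (fun kv => (PySem.List.pyGet? kv.1 1).getD 0)) := by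
        rw [List.contains_eq_mem] at hc
        exact of_decide_eq_true hc
      have hadd := pv_set_add_of_contains (PySem.Set.ofList (L.map (fun kv => (PySem.List.pyGet? kv.1 1).getD 0))) ((PySem.List.pyGet? x.1 1).getD 0) hc
      rw [if_pos hc, hadd]
      refine congrArg₂ Prod.mk ?_ rfl
      have hkeysnd : (PySem.Dict.mk ((PySem.Set.ofList (L.map (fun kv => (PySem.List.pyGet? kv.1 1).getD 0))).map (fun lbl =>
          (lbl, PySem.Dict.mk (L.filter
            (fun kv => (PySem.List.pyGet? kv.1 1).getD 0 == lbl)))))).keys.Nodup := by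
        show (((PySem.Set.ofList (L.map (fun kv => (PySem.List.pyGet? kv.1 1).getD 0))).map (fun lbl =>
          (lbl, PySem.Dict.mk (L.filter
            (fun kv => (PySem.List.pyGet? kv.1 1).getD 0 == lbl))))).map (fun p => p.1)).Nodup
        rw [List.map_map]
        rw [show ((fun p : Int × PySem.Dict (List Int) Int => p.1) ∘ (fun lbl : Int =>
          (lbl, PySem.Dict.mk (L.filter
            (fun kv => (PySem.List.pyGet? kv.1 1).getD 0 == lbl))))) = id from rfl]
        rw [List.map_id]
        exact PySem.Set.nodup_ofList _
      have hitems : (((PySem.List.pyGet? x.1 1).getD 0), PySem.Dict.mk (L.filter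
            (fun kv => (PySem.List.pyGet? kv.1 1).getD 0 == (PySem.List.pyGet? x.1 1).getD 0))) ∈
          (PySem.Dict.mk ((PySem.Set.ofList (L.map (fun kv => (PySem.List.pyGet? kv.1 1).getD 0))).map (fun lbl => (lbl, PySem.Dict.mk (L.filter
            (fun kv => (PySem.List.pyGet? kv.1 1).getD 0 == lbl)))))).items :=
        List.mem_map_of_mem hmem
      have hgetD := PySem.Dict.getD_of_mem_items _ hitems hkeysnd PySem.Dict.empty
      simp only [PySem.Dict.modify]
      rw [hgetD]
      have hfreshin : (PySem.Dict.mk (L.filter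
          (fun kv => (PySem.List.pyGet? kv.1 1).getD 0 == (PySem.List.pyGet? x.1 1).getD 0))).contains x.1 = false := by
        simp only [PySem.Dict.contains, List.any_eq_false]
        intro p hp
        have hpL : p ∈ L := List.mem_of_mem_filter hp
        intro hpe
        apply hx1
        rw [← eq_of_beq hpe]
        exact List.mem_map_of_mem hpL
      have hinner : (PySem.Dict.mk (L.filter
            (fun kv => (PySem.List.pyGet? kv.1 1).getD 0 == (PySem.List.pyGet? x.1 1).getD 0))).insert x.1 x.2 =
          PySem.Dict.mk (L.filter
            (fun kv => (PySem.List.pyGet? kv.1 1).getD 0 == (PySem.List.pyGet? x.1 1).getD 0) ++ [(x.1, x.2)]) := by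
        apply PySem.Dict.ext
        rw [PySem.Dict.items_insert_of_not_contains _ _ hfreshin]
      rw [hinner]
      have hcontOuter : (PySem.Dict.mk ((PySem.Set.ofList (L.map (fun kv => (PySem.List.pyGet? kv.1 1).getD 0))).map (fun lbl =>
          (lbl, PySem.Dict.mk (L.filter
            (fun kv => (PySem.List.pyGet? kv.1 1).getD 0 == lbl)))))).contains
          ((PySem.List.pyGet? x.1 1).getD 0) = true := by
        simp only [PySem.Dict.contains, List.any_eq_true]
        exact ⟨_, List.mem_map_of_mem hmem, by simp⟩
      apply PySem.Dict.ext
      rw [PySem.Dict.items_insert_of_contains _ _ hcontOuter]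
      show _ = List.map _ (PySem.Set.ofList (L.map (fun kv => (PySem.List.pyGet? kv.1 1).getD 0)))
      rw [List.map_map]
      refine List.map_congr_left ?_
      intro lbl hl
      by_cases he : lbl = (PySem.List.pyGet? x.1 1).getD 0
      · subst he
        simp
      · have hne : (lbl == (PySem.List.pyGet? x.1 1).getD 0) = false := beq_eq_false_iff_ne.mpr he
        have hne' : ((PySem.List.pyGet? x.1 1).getD 0 == lbl) = false :=
          beq_eq_false_iff_ne.mpr (Ne.symm he)
        simp [Function.comp, hne, hne']
    · -- the label of x is new
      have hnmem : ((PySem.List.pyGet? x.1 1).getD 0) ∉ PySem.Set.ofList (L.map (fun kv => (PySem.List.pyGet? kv.1 1).getD 0)) := by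
        intro hmm
        rw [List.contains_eq_mem] at hc
        exact hc (decide_eq_true hmm)
      have hnL : ∀ kv ∈ L, ((PySem.List.pyGet? kv.1 1).getD 0 == (PySem.List.pyGet? x.1 1).getD 0) = false := by
        intro kv hkv
        refine beq_eq_false_iff_ne.mpr fun hpe => hnmem ?_
        rw [← hpe]
        exact (PySem.Set.mem_ofList _ _).mpr (List.mem_map_of_mem hkv)
      have hcf : List.contains (PySem.Set.ofList (L.map (fun kv => (PySem.List.pyGet? kv.1 1).getD 0))) ((PySem.List.pyGet? x.1 1).getD 0) = false := by
        simp only [Bool.not_eq_true] at hc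
        exact hc
      have hadd := pv_set_add_of_not_contains (PySem.Set.ofList (L.map (fun kv => (PySem.List.pyGet? kv.1 1).getD 0))) ((PySem.List.pyGet? x.1 1).getD 0) hcf
      rw [if_neg hc, hadd]
      refine congrArg₂ Prod.mk ?_ rfl
      have hcontOuter : (PySem.Dict.mk ((PySem.Set.ofList (L.map (fun kv => (PySem.List.pyGet? kv.1 1).getD 0))).map (fun lbl =>
          (lbl, PySem.Dict.mk (L.filter
            (fun kv => (PySem.List.pyGet? kv.1 1).getD 0 == lbl)))))).contains
          ((PySem.List.pyGet? x.1 1).getD 0) = false := by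
        simp only [PySem.Dict.contains, List.any_eq_false]
        intro p hp
        obtain ⟨lbl, hl, rfl⟩ := List.mem_map.mp hp
        intro hpe
        apply hnmem
        rw [← eq_of_beq hpe]
        exact hl
      apply PySem.Dict.ext
      rw [PySem.Dict.items_insert_of_not_contains _ _ hcontOuter]
      show _ = List.map _ (PySem.Set.ofList (L.map (fun kv => (PySem.List.pyGet? kv.1 1).getD 0)) ++ [(PySem.List.pyGet? x.1 1).getD 0])
      rw [List.map_append]
      refine congrArg₂ (· ++ ·) ?_ ?_
      · refine List.map_congr_left ?_
        intro lbl hl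
        have hne' : ((PySem.List.pyGet? x.1 1).getD 0 == lbl) = false := by
          refine beq_eq_false_iff_ne.mpr fun hpe => hnmem ?_
          rw [hpe]
          exact hl
        simp [hne']
      · have hfilnil : L.filter
            (fun kv => (PySem.List.pyGet? kv.1 1).getD 0 == (PySem.List.pyGet? x.1 1).getD 0) = [] :=
          List.filter_eq_nil_iff.mpr (by intro kv hkv; simp [hnL kv hkv])
        simp [hfilnil, PySem.Dict.ofList, PySem.Dict.update, PySem.Dict.insert,
          PySem.Dict.contains, PySem.Dict.empty]

-- ===== VERDICT =====
theorem unique_codes_to_dict_spec : Claim_equal_unique_codes_to_dict := by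
  intro u _ _
  unfold Spec_unique_codes_to_dict unique_codes_to_dict unique_codes_to_dict_alt
  have hnd : (((PySem.Dict.ofList u).items).map (fun p => p.1)).Nodup :=
    PySem.Dict.nodup_keys_ofList u
  rw [pv_core _ hnd]
  simp only [PySem.List.dedup, List.map_map]
  refine List.map_congr_left ?_
  intro lbl _
  simp only [Function.comp]
  rw [pv_ofList_items ((PySem.Dict.ofList u).items.filter
        (fun kv => (PySem.List.pyGet? kv.1 1).getD 0 == lbl))
        (List.Sublist.nodup (List.Sublist.map _ (List.filter_sublist)) hnd)]
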